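-- pv_equiv track=rewrite | github.com/ECSIS-lab/TCHES_UH23 | Step4_Recovery_Exponent/enzan_rule.py | DJBRule3
-- ===== SOURCE A (Python) =====
-- def DJBRule3(bit_r2,w):
--     bit_r3=bit_r2
--     m_index = [i for i in range(len(bit_r3)) if bit_r3[i] == "I"]
--     for i in range(len(m_index)-1):
--         watch_bit = bit_r3[m_index[i]+1:m_index[i+1]]
--         j = len(watch_bit) - (w-1)
--         if j > 0:
--             for k in range(len(watch_bit)):
--                 if watch_bit[k] == "x" and k < j:
--                     watch_bit = watch_bit[:k] + "O" + watch_bit[k+1:]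
--             bit_r3 = bit_r3[:m_index[i]+1] + watch_bit + bit_r3[m_index[i+1]:]
--     return bit_r3
-- ===== SOURCE B (Python) =====
-- def DJBRule3(bit_r2, w):
--     def fix(p):
--         cut = len(p) - (w - 1)
--         if cut <= 0:
--             return p
--         return "".join("O" if c == "x" and k < cut else c for k, c in enumerate(p))
--     parts = bit_r2.split("I")
--     if len(parts) <= 1:
--         return bit_r2
--     return "I".join(parts[:1] + [fix(p) for p in parts[1:-1]] + parts[-1:])
-- ===== Notes on version B (the rewrite author's own statement) =====
-- stated objective: simpler
-- what changed: A scans for every 'I' index and repeatedly splices rewritten windows back into the whole string by index slicing; B splits the string on 'I' once, rewrites each interior segment locally ('x'->'O' at offsets below len(seg)-(w-1)), and joins the segments back with 'I'.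
import Mathlib
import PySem

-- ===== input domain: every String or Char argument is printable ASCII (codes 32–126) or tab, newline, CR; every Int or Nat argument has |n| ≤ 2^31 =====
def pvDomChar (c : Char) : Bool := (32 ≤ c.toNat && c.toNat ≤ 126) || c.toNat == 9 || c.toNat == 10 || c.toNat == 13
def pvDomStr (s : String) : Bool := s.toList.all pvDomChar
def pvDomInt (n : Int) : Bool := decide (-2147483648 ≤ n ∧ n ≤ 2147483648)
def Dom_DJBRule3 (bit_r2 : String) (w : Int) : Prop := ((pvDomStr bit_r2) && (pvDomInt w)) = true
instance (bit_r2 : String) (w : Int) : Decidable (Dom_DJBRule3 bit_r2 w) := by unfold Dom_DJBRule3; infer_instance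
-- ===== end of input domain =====

-- B replaces A's index bookkeeping (scan for 'I' positions, repeated slicing/splicing of the
-- whole string) by one split("I"), a per-segment rewrite of the interior parts, and one join.

-- ===== PORT A =====
-- [i for i in range(len(bit_r3)) if bit_r3[i] == "I"]
def aIdx (bit_r3 : List Char) : List Int :=
  (PySem.List.pyRange 0 (bit_r3.length : Int) 1).filter
    (fun i => PySem.List.pyGet? bit_r3 i == some 'I')

-- one step of the inner 'for k in range(len(watch_bit))' loop
def aInnerStep (j : Int) (wb : List Char) (k : Int) : List Char :=
  if PySem.List.pyGet? wb k = some 'x' ∧ k < j then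
    PySem.List.slice wb none (some k) ++ 'O' :: PySem.List.slice wb (some (k + 1)) none
  else wb

-- one step of the outer 'for i in range(len(m_index)-1)' loop
def aStep (w : Int) (mIndex : List Int) (bit : List Char) (i : Int) : List Char :=
  let mi := PySem.List.pyGetD mIndex i 0
  let mi1 := PySem.List.pyGetD mIndex (i + 1) 0
  let watch := PySem.List.slice bit (some (mi + 1)) (some mi1)
  let j : Int := (watch.length : Int) - (w - 1)
  if 0 < j then
    let watch' := (PySem.List.pyRange 0 (watch.length : Int) 1).foldl (aInnerStep j) watch
    PySem.List.slice bit none (some (mi + 1)) ++ watch' ++ PySem.List.slice bit (some mi1) none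
  else bit

def DJBRule3 (bit_r2 : String) (w : Int) : String :=
  let bit_r3 := bit_r2.toList
  let mIndex := aIdx bit_r3
  String.ofList
    ((PySem.List.pyRange 0 ((mIndex.length : Int) - 1) 1).foldl (aStep w mIndex) bit_r3)

-- ===== PORT B =====
-- fix(p): rewrite 'x' to 'O' at offsets k below cut = len(p) - (w-1)
def fixSeg (w : Int) (p : List Char) : List Char :=
  if (p.length : Int) - (w - 1) ≤ 0 then p
  else (PySem.List.enumerate p 0).map
    (fun kc => if kc.2 = 'x' ∧ kc.1 < (p.length : Int) - (w - 1) then 'O' else kc.2)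

def DJBRule3_alt (bit_r2 : String) (w : Int) : String :=
  let parts := bit_r2.toList.splitOn 'I'
  if parts.length ≤ 1 then bit_r2
  else
    String.ofList (List.intercalate ['I']
      (parts.take 1 ++ ((parts.drop 1).dropLast).map (fixSeg w)
        ++ parts.drop (parts.length - 1)))

-- ===== PRECONDITION & SPEC =====
def Spec_DJBRule3 (bit_r2 : String) (w : Int) (out : String) : Prop := out = DJBRule3_alt bit_r2 w
instance (bit_r2 : String) (w : Int) (out : String) : Decidable (Spec_DJBRule3 bit_r2 w out) := by unfold Spec_DJBRule3; infer_instance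

-- ===== CLAIM (what is proved, stated in full; the proofs are below) =====
def Claim_equal_DJBRule3 : Prop := ∀ (bit_r2 : String) (w : Int), Dom_DJBRule3 bit_r2 w → Spec_DJBRule3 bit_r2 w (DJBRule3 bit_r2 w)

-- ===== LEMMAS AND PROOFS =====

theorem interI_cons (m : List Char) (suf : List (List Char)) (h : suf ≠ []) :
    List.intercalate ['I'] (m :: suf) = m ++ 'I' :: List.intercalate ['I'] suf := by
  cases suf with
  | nil => simp at h
  | cons s rest => simp [List.intercalate, List.intersperse]

theorem interI_append (xs ys : List (List Char)) (hx : xs ≠ []) (hy : ys ≠ []) :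
    List.intercalate ['I'] (xs ++ ys)
      = List.intercalate ['I'] xs ++ 'I' :: List.intercalate ['I'] ys := by
  induction xs with
  | nil => simp at hx
  | cons x xs ih =>
    cases xs with
    | nil =>
      rw [List.singleton_append, interI_cons x ys hy]
      simp [List.intercalate]
    | cons x' xs' =>
      rw [List.cons_append, interI_cons _ _ (by simp), interI_cons _ _ (by simp),
        ih (by simp)]
      simp

theorem length_interI (qs : List (List Char)) (h : qs ≠ []) :
    (List.intercalate ['I'] qs).length = (qs.map List.length).sum + qs.length - 1 := by
  induction qs with
  | nil => simp at h
  | cons q qs ih =>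
    cases qs with
    | nil => simp [List.intercalate]
    | cons q' qs' =>
      rw [interI_cons _ _ (by simp)]
      have := ih (by simp)
      simp only [List.length_append, List.length_cons, List.map_cons, List.sum_cons] at this ⊢
      omega

theorem splitOn_I_free (cs : List Char) : ∀ p ∈ cs.splitOn 'I', 'I' ∉ p := by
  show ∀ p ∈ cs.splitOnP (· == 'I'), 'I' ∉ p
  induction cs with
  | nil => simp [List.splitOnP_nil]
  | cons c cs ih =>
    intro p hp
    rw [List.splitOnP_cons] at hp
    by_cases hc : c = 'I'
    · simp [hc] at hp
      rcases hp with h | h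
      · simp [h]
      · exact ih p h
    · simp [hc] at hp
      obtain ⟨h0, t, hsp⟩ := List.exists_cons_of_ne_nil (List.splitOnP_ne_nil (· == 'I') cs)
      rw [hsp] at hp
      simp [List.modifyHead] at hp
      rcases hp with h | h
      · subst h
        intro hmem
        rcases List.mem_cons.mp hmem with h | h
        · exact hc h.symm
        · exact ih h0 (by simp [hsp]) h
      · exact ih p (by simp [hsp, h])

def natIdx (cs : List Char) : List Nat :=
  (List.range cs.length).filter (fun k => cs[k]? == some 'I')


theorem aIdx_eq_natIdx (cs : List Char) : aIdx cs = (natIdx cs).map Nat.cast := by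
  unfold aIdx natIdx
  rw [PySem.List.pyRange_one, List.filter_map]
  simp only [Int.sub_zero, Int.toNat_natCast]
  rw [show (List.filter ((fun i => PySem.List.pyGet? cs i == some 'I') ∘ fun k : Nat => (0 : Int) + ↑k) (List.range cs.length)) = List.filter (fun k => cs[k]? == some 'I') (List.range cs.length) from List.filter_congr (by intro k hk; simp [PySem.List.pyGet?_natCast])]
  apply List.map_congr_left
  intro a _
  simp

theorem natIdx_cons (c : Char) (zs : List Char) :
    natIdx (c :: zs) = (if c = 'I' then [0] else []) ++ (natIdx zs).map (· + 1) := by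
  unfold natIdx
  rw [List.length_cons, List.range_succ_eq_map, List.filter_cons, List.filter_map]
  by_cases hc : c = 'I' <;>
    simp [hc, Function.comp_def, Nat.succ_eq_add_one]

theorem natIdx_append (xs ys : List Char) :
    natIdx (xs ++ ys) = natIdx xs ++ (natIdx ys).map (· + xs.length) := by
  induction xs with
  | nil => simp [natIdx]
  | cons c xs ih =>
    rw [List.cons_append, natIdx_cons, natIdx_cons, ih]
    simp only [List.map_append, List.map_map, List.append_assoc, List.length_cons]
    congr 3

theorem natIdx_of_I_free (cs : List Char) (h : 'I' ∉ cs) : natIdx cs = [] := by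
  unfold natIdx
  rw [List.filter_eq_nil_iff]
  intro k hk
  rw [List.mem_range] at hk
  simp only [List.getElem?_eq_getElem hk, beq_iff_eq, Option.some.injEq]
  intro hEq
  exact h (hEq ▸ List.getElem_mem hk)

def posNat (parts : List (List Char)) (t : Nat) : Nat :=
  ((parts.map List.length).take (t + 1)).sum + t

theorem natIdx_intercalate (parts : List (List Char)) (h : ∀ p ∈ parts, 'I' ∉ p)
    (hne : parts ≠ []) :
    natIdx (List.intercalate ['I'] parts)
      = (List.range (parts.length - 1)).map (posNat parts) := by
  induction parts with
  | nil => simp at hne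
  | cons p rest ih =>
    cases rest with
    | nil =>
      simp [List.intercalate, natIdx_of_I_free p (h p (by simp))]
    | cons q rest' =>
      rw [interI_cons _ _ (by simp), natIdx_append, natIdx_of_I_free p (h p (by simp)),
        natIdx_cons, ih (by intro p hp; exact h p (by simp [hp])) (by simp)]
      simp only [List.nil_append, List.map_append, List.map_map, List.length_cons]
      simp only [if_true, List.map_cons, List.map_nil, List.singleton_append,
        Nat.add_sub_cancel]
      rw [List.range_succ_eq_map]
      simp only [List.map_cons, List.map_map]
      congr 1
      · simp [posNat]
      · apply List.map_congr_left
        intro k _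
        simp only [Function.comp_apply, posNat, Nat.succ_eq_add_one, List.map_cons,
          List.take_succ_cons, List.sum_cons]
        omega

theorem posNat_succ (parts : List (List Char)) (t : Nat) (h : t + 1 < parts.length) :
    posNat parts (t + 1) = posNat parts t + parts[t + 1].length + 1 := by
  unfold posNat
  rw [List.take_add_one]
  have h' : t + 1 < (parts.map List.length).length := by simpa using h
  rw [List.getElem?_eq_getElem h']
  simp
  omega



theorem length_fixSeg (w : Int) (p : List Char) : (fixSeg w p).length = p.length := by
  unfold fixSeg
  split
  · rfl
  · simp [PySem.List.length_enumerate]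

def updParts (w : Int) (parts : List (List Char)) (t : Nat) : List (List Char) :=
  parts.take 1 ++ ((parts.drop 1).take t).map (fixSeg w) ++ parts.drop (t + 1)

theorem concat_take_drop (parts : List (List Char)) (t : Nat) :
    parts.take 1 ++ ((parts.drop 1).take t) ++ parts.drop (t + 1) = parts := by
  conv_rhs => rw [← List.take_append_drop 1 parts]
  rw [List.append_assoc]
  congr 1
  conv_rhs => rw [← List.take_append_drop t (parts.drop 1)]
  congr 1
  rw [List.drop_drop, Nat.add_comm]

theorem updParts_zero (w : Int) (parts : List (List Char)) :
    updParts w parts 0 = parts := by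
  have := concat_take_drop parts 0
  simpa [updParts] using this

theorem inner_loop (j : Int) (suf : List Char) : ∀ (pre : List Char),
    (PySem.List.pyRange (pre.length : Int) ((pre.length + suf.length : Nat) : Int) 1).foldl
        (aInnerStep j) (pre ++ suf)
      = pre ++ (PySem.List.enumerate suf (pre.length : Int)).map
          (fun kc => if kc.2 = 'x' ∧ kc.1 < j then 'O' else kc.2) := by
  induction suf with
  | nil =>
    intro pre
    rw [PySem.List.pyRange_one_eq_nil (by simp)]
    simp [PySem.List.enumerate]
  | cons c suf ih =>
    intro pre
    rw [PySem.List.pyRange_one_cons (by simp only [List.length_cons]; push_cast; omega)]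
    rw [List.foldl_cons]
    have hstep : aInnerStep j (pre ++ c :: suf) (pre.length : Int)
        = (pre ++ [if c = 'x' ∧ (pre.length : Int) < j then 'O' else c]) ++ suf := by
      unfold aInnerStep
      have hget : PySem.List.pyGet? (pre ++ c :: suf) (pre.length : Int) = some c := by
        rw [PySem.List.pyGet?_natCast]
        simp
      rw [hget]
      by_cases hc : c = 'x' ∧ ((pre.length : Nat) : Int) < j
      · rw [if_pos (by exact ⟨by rw [hc.1], hc.2⟩), if_pos hc]
        rw [PySem.List.slice_to _ (Int.natCast_nonneg _),
          PySem.List.slice_from _ (by omega)]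
        simp only [Int.toNat_natCast]
        rw [List.take_left]
        rw [show ((pre.length : Int) + 1).toNat = (pre ++ [c]).length from by simp]
        rw [show pre ++ c :: suf = (pre ++ [c]) ++ suf from by simp, List.drop_left]
        simp
      · rw [if_neg (fun hcon => hc ⟨by injection hcon.1, hcon.2⟩), if_neg hc]
        simp
    rw [hstep]
    have harith : ((pre.length : Int) + 1) = (((pre ++ [if c = 'x' ∧ (pre.length : Int) < j then 'O' else c]).length : Nat) : Int) := by
      simp
    have harith2 : ((pre.length + (c :: suf).length : Nat) : Int)
        = (((pre ++ [if c = 'x' ∧ (pre.length : Int) < j then 'O' else c]).length + suf.length : Nat) : Int) := by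
      simp
      omega
    rw [harith, harith2, ih]
    rw [PySem.List.enumerate_cons]
    simp


theorem aStep_step (w : Int) (parts : List (List Char))
    (n : Nat) (hn : parts.length = n + 1) (t : Nat) (ht : t + 2 ≤ n) :
    aStep w ((List.range n).map (fun s => ((posNat parts s : Nat) : Int)))
        (List.intercalate ['I'] (updParts w parts t)) (t : Int)
      = List.intercalate ['I'] (updParts w parts (t + 1)) := by
  set C : List (List Char) := parts.take 1 ++ ((parts.drop 1).take t).map (fixSeg w) with hCdef
  have ht1 : t + 1 < parts.length := by omega
  set m : List Char := parts[t + 1] with hmdef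
  set SUF : List (List Char) := parts.drop (t + 2) with hSdef
  have hlen1 : 1 ≤ parts.length := by omega
  have hlenC : C.length = t + 1 := by
    simp [hCdef, List.length_take, hn]
    omega
  have hupd_t : updParts w parts t = C ++ m :: SUF := by
    rw [updParts, List.append_assoc, hmdef, hSdef, ← List.drop_eq_getElem_cons ht1, hCdef,
      List.append_assoc]
  have hupd_t1 : updParts w parts (t + 1) = C ++ fixSeg w m :: SUF := by
    have htake1 : (parts.drop 1).take (t + 1) = (parts.drop 1).take t ++ [parts[t + 1]] := by
      rw [List.take_add_one, List.getElem?_drop, show (1 + t : Nat) = t + 1 from by omega,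
        List.getElem?_eq_getElem ht1]
      simp
    rw [updParts, htake1]
    simp only [List.map_append, List.map_cons, List.map_nil]
    rw [hCdef, hmdef, hSdef]
    simp [List.append_assoc, show (t + 1 + 1 : Nat) = t + 2 from by omega]
  have hC : C ≠ [] := by
    intro h; rw [h] at hlenC; simp at hlenC
  have hS : SUF ≠ [] := by
    have : SUF.length = n + 1 - (t + 2) := by simp [hSdef, hn]
    intro h; rw [h] at this; simp at this; omega
  have hmapC : C.map List.length = (parts.map List.length).take (t + 1) := by
    rw [hCdef, List.map_append, List.map_map,
      show List.length ∘ fixSeg w = List.length from funext (length_fixSeg w),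
      show (t + 1 : Nat) = 1 + t from by omega, List.take_add]
    simp [List.map_take]
  have hIC : (List.intercalate ['I'] C).length = posNat parts t := by
    rw [length_interI C hC, hmapC, hlenC, posNat]
    omega
  set IC : List Char := List.intercalate ['I'] C with hICdef
  set IS : List Char := List.intercalate ['I'] SUF with hISdef
  have hinter_t : List.intercalate ['I'] (updParts w parts t)
      = IC ++ 'I' :: (m ++ 'I' :: IS) := by
    rw [hupd_t, interI_append C _ hC (by simp), interI_cons m SUF hS]
  have hinter_t1 : List.intercalate ['I'] (updParts w parts (t + 1))
      = IC ++ 'I' :: (fixSeg w m ++ 'I' :: IS) := by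
    rw [hupd_t1, interI_append C _ hC (by simp), interI_cons _ SUF hS]
  have hps : posNat parts (t + 1) = posNat parts t + m.length + 1 := by
    rw [posNat_succ parts t ht1, hmdef]
  have hmi : PySem.List.pyGetD ((List.range n).map (fun s => ((posNat parts s : Nat) : Int))) (t : Int) 0
      = ((posNat parts t : Nat) : Int) := by
    rw [PySem.List.pyGetD_natCast, PySem.List.getD_map_range _ _ _ _ (by omega)]
  have hmi1 : PySem.List.pyGetD ((List.range n).map (fun s => ((posNat parts s : Nat) : Int))) ((t : Int) + 1) 0
      = ((posNat parts (t + 1) : Nat) : Int) := by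
    rw [show ((t : Int) + 1) = ((t + 1 : Nat) : Int) from by push_cast; ring,
      PySem.List.pyGetD_natCast, PySem.List.getD_map_range _ _ _ _ (by omega)]
  have hsplit1 : IC ++ 'I' :: (m ++ 'I' :: IS) = (IC ++ ['I']) ++ (m ++ 'I' :: IS) := by
    simp
  have hlenIC1 : (IC ++ ['I']).length = posNat parts t + 1 := by
    simp [hIC]
  have hwatch : PySem.List.slice (IC ++ 'I' :: (m ++ 'I' :: IS))
      (some (((posNat parts t : Nat) : Int) + 1)) (some ((posNat parts (t + 1) : Nat) : Int)) = m := by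
    rw [PySem.List.slice_toNat _ (by omega) (by omega), hsplit1,
      show (((posNat parts t : Nat) : Int) + 1).toNat = (IC ++ ['I']).length from by
        simp [hlenIC1],
      List.drop_left,
      show (((posNat parts (t + 1) : Nat) : Int)).toNat - (IC ++ ['I']).length = m.length from by
        simp [hps]; omega]
    rw [show m ++ 'I' :: IS = m ++ ('I' :: IS) from rfl, List.take_left]
  rw [hinter_t]
  simp only [aStep, hmi, hmi1, hwatch]
  by_cases hj : (0 : Int) < (m.length : Int) - (w - 1)
  · rw [if_pos hj]
    have hfold : (PySem.List.pyRange 0 (m.length : Int) 1).foldl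
        (aInnerStep ((m.length : Int) - (w - 1))) m = fixSeg w m := by
      have h := inner_loop ((m.length : Int) - (w - 1)) m []
      simp only [List.length_nil, Nat.cast_zero, Nat.zero_add, List.nil_append] at h
      rw [h, fixSeg, if_neg (by omega)]
    rw [hfold]
    have htake : PySem.List.slice (IC ++ 'I' :: (m ++ 'I' :: IS)) none
        (some (((posNat parts t : Nat) : Int) + 1)) = IC ++ ['I'] := by
      rw [PySem.List.slice_to _ (by omega), hsplit1,
        show (((posNat parts t : Nat) : Int) + 1).toNat = (IC ++ ['I']).length from by
          simp [hlenIC1],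
        List.take_left]
    have hdrop : PySem.List.slice (IC ++ 'I' :: (m ++ 'I' :: IS))
        (some (((posNat parts (t + 1) : Nat) : Int))) none = 'I' :: IS := by
      rw [PySem.List.slice_from _ (by omega),
        show IC ++ 'I' :: (m ++ 'I' :: IS) = ((IC ++ ['I']) ++ m) ++ ('I' :: IS) from by simp,
        show (((posNat parts (t + 1) : Nat) : Int)).toNat = ((IC ++ ['I']) ++ m).length from by
          simp [hps]; omega,
        List.drop_left]
    rw [htake, hdrop, hinter_t1]
    simp
  · rw [if_neg hj, hinter_t1, fixSeg, if_pos (by omega)]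

theorem main_loop (w : Int) (parts : List (List Char))
    (n : Nat) (hn : parts.length = n + 1) (hn1 : 1 ≤ n) :
    ∀ (d t : Nat), t + d = n - 1 →
    (PySem.List.pyRange (t : Int) ((n : Int) - 1) 1).foldl
        (aStep w ((List.range n).map (fun s => ((posNat parts s : Nat) : Int))))
        (List.intercalate ['I'] (updParts w parts t))
      = List.intercalate ['I'] (updParts w parts (n - 1)) := by
  intro d
  induction d with
  | zero =>
    intro t htd
    rw [PySem.List.pyRange_one_eq_nil (by omega), List.foldl_nil,
      show t = n - 1 from by omega]
  | succ d ih =>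
    intro t htd
    rw [PySem.List.pyRange_one_cons (by omega), List.foldl_cons,
      aStep_step w parts n hn t (by omega),
      show ((t : Int) + 1) = ((t + 1 : Nat) : Int) from by push_cast; ring,
      ih (t + 1) (by omega)]




theorem ports_agree (bit_r2 : String) (w : Int) : DJBRule3 bit_r2 w = DJBRule3_alt bit_r2 w := by
  simp only [DJBRule3, DJBRule3_alt]
  set cs := bit_r2.toList with hcsdef
  set parts := cs.splitOn 'I' with hpartsdef
  have hne : parts ≠ [] := List.splitOnP_ne_nil _ cs
  have hIfree : ∀ p ∈ parts, 'I' ∉ p := splitOn_I_free cs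
  have hinter : List.intercalate ['I'] parts = cs := List.intercalate_splitOn cs 'I'
  by_cases hlen : parts.length ≤ 1
  · rw [if_pos hlen]
    obtain ⟨p, hp⟩ : ∃ p, parts = [p] := by
      cases hq : parts with
      | nil => exact absurd hq hne
      | cons a l =>
        cases l with
        | nil => exact ⟨a, rfl⟩
        | cons b l' => rw [hq] at hlen; simp at hlen
    have hcs : cs = p := by rw [← hinter, hp]; simp [List.intercalate]
    have hIdx : aIdx cs = [] := by
      rw [aIdx_eq_natIdx, natIdx_of_I_free cs (by rw [hcs]; exact hIfree p (by simp [hp]))]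
      rfl
    rw [hIdx]
    rw [PySem.List.pyRange_one_eq_nil (by norm_num), List.foldl_nil, hcsdef,
      String.ofList_toList]
  · rw [if_neg hlen]
    have hn : parts.length = (parts.length - 1) + 1 := by omega
    set n := parts.length - 1 with hndef
    have hn1 : 1 ≤ n := by omega
    have hIdx : aIdx cs = (List.range n).map (fun s => ((posNat parts s : Nat) : Int)) := by
      conv_lhs => rw [aIdx_eq_natIdx, ← hinter]
      rw [natIdx_intercalate parts hIfree hne, List.map_map]
      rfl
    rw [hIdx]
    have hlenIdx : (((List.range n).map (fun s => ((posNat parts s : Nat) : Int))).length : Int) = (n : Int) := by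
      simp
    rw [hlenIdx]
    have hmain := main_loop w parts n hn hn1 (n - 1) 0 (by omega)
    rw [updParts_zero] at hmain
    rw [show ((0 : Nat) : Int) = (0 : Int) from rfl] at hmain
    conv_lhs => rw [← hinter]
    rw [hmain, updParts, List.dropLast_eq_take, List.length_drop,
      show parts.length - 1 - 1 = n - 1 from by omega,
      show n - 1 + 1 = parts.length - 1 from by omega]

-- ===== VERDICT (by name: the statement is the Claim_ definition above) =====
theorem DJBRule3_spec : Claim_equal_DJBRule3 := by
  intro bit_r2 w _
  unfold Spec_DJBRule3
  exact ports_agree bit_r2 w
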